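-- pv_equiv track=rewrite | github.com/EYO-07/StupidPythonScripts | cmd_Interface_11072020.py | count_ast
-- ===== SOURCE A (Python) =====
-- def count_ast(string):
--     ast = 0
--     L = len(string)
--     count = 0
--     while ast<L:
--         if string[ast]=='*':
--             ast = ast + 1
--         count = count + 1
--         if ast!=count: break
--     return ast
-- ===== SOURCE B (Python) =====
-- def count_ast(string):
--     return len(string) - len(string.lstrip('*'))
-- ===== Notes on version B (the rewrite author's own statement) =====
-- stated objective: simpler
-- what changed: Replaced the hand-rolled index/count while-loop with a one-line closed form: the count of leading '*' is len(s) minus len(s.lstrip('*')).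
import Mathlib
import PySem

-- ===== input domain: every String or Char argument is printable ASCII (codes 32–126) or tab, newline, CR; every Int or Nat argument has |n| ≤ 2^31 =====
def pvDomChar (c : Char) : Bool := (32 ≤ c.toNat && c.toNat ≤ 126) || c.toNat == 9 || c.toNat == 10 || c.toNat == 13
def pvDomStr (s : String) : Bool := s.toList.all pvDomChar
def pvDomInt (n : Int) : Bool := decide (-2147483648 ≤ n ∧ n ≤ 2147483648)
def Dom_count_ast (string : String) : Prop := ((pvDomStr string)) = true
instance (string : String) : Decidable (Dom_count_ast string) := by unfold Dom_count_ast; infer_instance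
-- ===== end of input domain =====

-- B replaces A's index/count while-loop with a closed form: len(s) - len(s.lstrip('*')); simpler, same O(n).


-- ===== PORT A =====
-- the while-loop of A: state (ast, count), guard ast < L, break when ast != count.
-- fuel is only a totality guard: each iteration increases count by 1 and the loop
-- exits once ast < count, so L.toNat + 1 iterations always suffice.
def count_ast_loop (s : List Char) (L : Int) : Nat → Int → Int → Int
  | 0, ast, _ => ast
  | fuel + 1, ast, count =>
    if ast < L then
      let ast' := if PySem.List.pyGet? s ast = some '*' then ast + 1 else ast
      let count' := count + 1
      if ast' ≠ count' then ast' else count_ast_loop s L fuel ast' count'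
    else ast

def count_ast (string : String) : Int :=
  count_ast_loop string.toList (PySem.Str.len string) (string.toList.length + 1) 0 0

-- ===== PORT B =====
-- string.lstrip('*') ported by hand (no PySem lstrip-with-chars): drop leading '*' characters; exact there
def count_ast_alt (string : String) : Int :=
  (PySem.Str.len string : Int) - (string.toList.dropWhile (fun c => c = '*')).length

-- ===== PRECONDITION & SPEC =====
def Spec_count_ast (string : String) (out : Int) : Prop := out = count_ast_alt string
instance (string : String) (out : Int) : Decidable (Spec_count_ast string out) := by unfold Spec_count_ast; infer_instance

-- ===== CLAIM (what is proved, stated in full; the proofs are below) =====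
def Claim_equal_count_ast : Prop := ∀ (string : String), Dom_count_ast string → Spec_count_ast string (count_ast string)

-- ===== LEMMAS AND PROOFS =====

-- one unrolling of A's loop at equal counters ast = count = k
theorem count_ast_step (s : List Char) (L k : Int) (fuel : Nat) (h : k < L) :
    count_ast_loop s L (fuel + 1) k k =
      if PySem.List.pyGet? s k = some '*' then count_ast_loop s L fuel (k + 1) (k + 1) else k := by
  rw [count_ast_loop]
  rw [if_pos h]
  by_cases hc : PySem.List.pyGet? s k = some '*'
  · simp [hc]
  · simp only [hc, if_false, ite_not, if_neg (by omega : ¬ k = k + 1)]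

-- A's loop at counters k on a string of length k + n returns k + (number of '*' at the head of drop k)
theorem count_ast_loop_drop : ∀ (n : ℕ) (s : List Char) (k : ℕ) (fuel : ℕ), s.length = k + n → n < fuel →
    count_ast_loop s s.length fuel k k = k + ((s.drop k).takeWhile (fun c => c = '*')).length := by
  intro n
  induction n with
  | zero =>
      intro s k fuel hk hf
      obtain ⟨m, rfl⟩ : ∃ m, fuel = m + 1 := ⟨fuel - 1, by omega⟩
      rw [count_ast_loop]
      rw [if_neg (by omega)]
      rw [List.drop_of_length_le (by omega)]
      simp
  | succ n ih =>
      intro s k fuel hk hf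
      obtain ⟨m, rfl⟩ : ∃ m, fuel = m + 1 := ⟨fuel - 1, by omega⟩
      have hklt : k < s.length := by omega
      rw [count_ast_step s s.length k m (by omega)]
      simp only [PySem.List.pyGet?_natCast, List.getElem?_eq_getElem hklt]
      have hdrop : s.drop k = s[k] :: s.drop (k + 1) := List.drop_eq_getElem_cons hklt
      by_cases hc : s[k] = '*'
      · rw [if_pos (by rw [hc])]
        have hcast : ((k : Int) + 1) = (((k + 1 : ℕ)) : Int) := by push_cast; ring
        rw [hcast, ih s (k + 1) m (by omega) (by omega)]
        rw [hdrop, hc]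
        simp [List.takeWhile]
        ring
      · rw [if_neg (by simp [hc])]
        rw [hdrop]
        simp [List.takeWhile, hc]

theorem takeWhile_dropWhile_len (s : List Char) :
    ((s.takeWhile (fun c => c = '*')).length : Int)
      = (s.length : Int) - (s.dropWhile (fun c => c = '*')).length := by
  have h := List.takeWhile_append_dropWhile (p := fun c => decide (c = '*')) (l := s)
  have hl := congrArg List.length h
  simp only [List.length_append] at hl
  omega

-- ===== VERDICT (by name: the statement is the Claim_ definition above) =====
theorem count_ast_spec : Claim_equal_count_ast := by
  intro s _
  unfold Spec_count_ast count_ast count_ast_alt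
  simp only [PySem.Str.len_eq]
  have h0 := count_ast_loop_drop s.toList.length s.toList 0 (s.toList.length + 1) (by omega) (by omega)
  simp only [Nat.cast_zero] at h0
  rw [h0]
  simp only [List.drop_zero, zero_add]
  rw [takeWhile_dropWhile_len]
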